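-- pv_equiv track=rewrite | github.com/SheikhBahman/CS-410-Text-Information-Systems-Project | similarity.py | get_skip_bigrams
-- ===== SOURCE A (Python) =====
-- def get_ngrams(orig_string, n):
--
--     term_char = '$'
--     skip_char = '|'
--
--     if (len(orig_string) < n):
--         return []
--
--     if (len(orig_string) == n):
--         return [term_char + orig_string + term_char]
--
--     begin_gram = orig_string[:n]
--     end_gram = orig_string[-n:]
--
--     # first, get n grams
--     ngrams = get_char_ngrams(orig_string, n)
--
--     found_begin = False
--     found_end = False
--
--     processed_list = []
--     for char_tuple in list(ngrams):
--         token = ''.join(list(char_tuple))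
--         # escape the dollar character, we want to preserve, but not confuse with begin/end dollars
--         esc_token = token.replace(
--             term_char, '<' + term_char + '>').replace(skip_char, '<' + skip_char + '>')
--
--         if token == begin_gram and not found_begin:
--             esc_token = term_char + esc_token
--             found_begin = True
--
--         elif token == end_gram and not found_end:
--             esc_token = esc_token + term_char
--             found_end = True
--
--         processed_list.append(esc_token)
--
--     # filter out duplicates
--     processed_list = list(set(processed_list))
--
--     return processed_list
--
-- def get_char_ngrams(orig_string, n):
--     num_grams = len(orig_string)-n+1
--     gram_list = list()
--     for x in range(0, num_grams):
--         gram = orig_string[x:x+n]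
--         gram_list.append(gram)
--     return gram_list
--
-- def get_skip_bigrams(orig_string, k):
--     if k < 1:
--         raise Exception('k must be >0')
--
--     gram_len = 2 + k
--     ngrams = get_ngrams(orig_string, gram_len)
--     term_char = '$'
--     skip_char = '|'
--
--     processed_list = []
--     for ngram in ngrams:
--         prefix = ''
--         suffix = ''
--
--         # strip off the terminators
--         if ngram[0] == term_char:
--             ngram = ngram[1:]
--             prefix = term_char
--
--         if ngram[-1] == term_char:
--             ngram = ngram[:-1]
--             suffix = term_char
--
--         # unescape special characters $ and |
--         ngram = ngram.replace(
--             '<' + term_char + '>', term_char).replace('<' + skip_char + '>', skip_char)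
--         skip_gram = ''
--
--         char1 = ngram[0]
--         # re-escape special characters
--         char1 = char1.replace(term_char, '<' + term_char +
--                               '>').replace(skip_char, '<' + skip_char + '>')
--
--         char2 = ngram[-1]
--         char2 = char2.replace(term_char, '<' + term_char +
--                               '>').replace(skip_char, '<' + skip_char + '>')
--
--         skip_gram = char1 + skip_char + char2
--
--         # re-add begin & end chars
--         processed_list.append(skip_gram)
--
--     # filter out duplicates
--     processed_list = list(set(processed_list))
--
--     return processed_list
-- ===== SOURCE B (Python) =====
-- def get_skip_bigrams(orig_string, k):
--     if k < 1:
--         raise Exception('k must be >0')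
--     n = k + 2
--     esc = {'$': '<$>', '|': '<|>'}
--     return list({esc.get(orig_string[i], orig_string[i]) + '|' +
--                  esc.get(orig_string[i + n - 1], orig_string[i + n - 1])
--                  for i in range(len(orig_string) - n + 1)})
-- ===== Notes on version B (the rewrite author's own statement) =====
-- stated objective: faster
-- what changed: B reads the two endpoint characters of each (2+k)-window directly and collects their escaped rendering into a set in one O(n) pass, instead of materialising every window, escaping it, marking/stripping terminators, unescaping and re-escaping it with two dedup passes.
-- intended difference: On strings of length exactly k+2 that begin or end with a literal escape sequence '<$>' or '<|>', A returns the endpoints of the text after un-escaping the raw input (e.g. '<$>|<$>' for '<$>', an artifact of its escape/unescape round trip that skips the escape step for the lone full-size window), while B returns the escaped actual endpoint characters (e.g. '<|>'), which is the intended skip-bigram of the string. — e.g. on get_skip_bigrams("<$>", 1): A returns ["<$>|<$>"], B returns ["<|>"]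
import Mathlib
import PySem

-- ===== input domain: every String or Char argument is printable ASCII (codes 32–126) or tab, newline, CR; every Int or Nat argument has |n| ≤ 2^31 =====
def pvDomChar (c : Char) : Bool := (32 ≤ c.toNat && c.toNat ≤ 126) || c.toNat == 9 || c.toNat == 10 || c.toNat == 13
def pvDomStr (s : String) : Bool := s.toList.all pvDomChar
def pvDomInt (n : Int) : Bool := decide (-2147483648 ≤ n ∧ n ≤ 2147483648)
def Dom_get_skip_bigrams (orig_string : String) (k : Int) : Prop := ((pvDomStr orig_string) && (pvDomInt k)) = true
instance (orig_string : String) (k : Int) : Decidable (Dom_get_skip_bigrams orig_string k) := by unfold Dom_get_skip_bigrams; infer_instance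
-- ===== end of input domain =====

-- B collects the escaped endpoint pair (s[i], s[i+k+1]) of every window directly (O(n)),
-- instead of building, escaping, unescaping and re-escaping every full (2+k)-window (O(n·k)).
-- Return order of list(set(...)) is hash order in Python; outputs are compared as sets,
-- both ports produce the first-occurrence order (PySem.Set).

-- ===== PORT A =====
-- escape: token.replace('$','<$>').replace('|','<|>')
def pvEscTok (t : List Char) : List Char :=
  PySem.Chars.replace (PySem.Chars.replace t ['$'] ['<', '$', '>']) ['|'] ['<', '|', '>']

-- get_char_ngrams: loop x in range(0, num_grams) appending orig_string[x:x+n]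
def get_char_ngrams (cs : List Char) (n : Int) : List (List Char) :=
  (PySem.List.pyRange 0 ((cs.length : Int) - n + 1) 1).foldl
    (fun acc x => acc ++ [PySem.List.slice cs (some x) (some (x + n))]) []

-- loop body of get_ngrams: state (found_begin, found_end, processed_list);
-- token = ''.join(list(char_tuple)) is the gram itself
def pvNgramStep (bg eg : List Char) (st : Bool × Bool × List (List Char)) (tok : List Char) :
    Bool × Bool × List (List Char) :=
  let esc := pvEscTok tok
  if tok == bg && !st.1 then (true, st.2.1, st.2.2 ++ [('$' :: esc)])
  else if tok == eg && !st.2.1 then (st.1, true, st.2.2 ++ [esc ++ ['$']])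
  else (st.1, st.2.1, st.2.2 ++ [esc])

def get_ngrams (orig_string : String) (n : Int) : List String :=
  let cs := orig_string.toList
  if (cs.length : Int) < n then []
  else if (cs.length : Int) = n then [String.ofList ('$' :: cs ++ ['$'])]
  else
    let begin_gram := PySem.List.slice cs none (some n)
    let end_gram := PySem.List.slice cs (some (-n)) none
    let ngrams := get_char_ngrams cs n
    let processed := (ngrams.foldl (pvNgramStep begin_gram end_gram) (false, false, [])).2.2
    -- processed_list = list(set(processed_list))
    (PySem.Set.ofList processed).map String.ofList

-- body of the loop in get_skip_bigrams (prefix/suffix are assigned but never used in A)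
def pvSkipGram (ngramS : String) : String :=
  let ng0 := ngramS.toList
  let ng1 := if PySem.List.pyGetD ng0 0 ' ' == '$' then PySem.List.slice ng0 (some 1) none else ng0
  let ng2 := if PySem.List.pyGetD ng1 (-1) ' ' == '$' then PySem.List.slice ng1 none (some (-1)) else ng1
  let ng3 := PySem.Chars.replace (PySem.Chars.replace ng2 ['<', '$', '>'] ['$']) ['<', '|', '>'] ['|']
  let c1 := [PySem.List.pyGetD ng3 0 ' ']
  let c1e := PySem.Chars.replace (PySem.Chars.replace c1 ['$'] ['<', '$', '>']) ['|'] ['<', '|', '>']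
  let c2 := [PySem.List.pyGetD ng3 (-1) ' ']
  let c2e := PySem.Chars.replace (PySem.Chars.replace c2 ['$'] ['<', '$', '>']) ['|'] ['<', '|', '>']
  String.ofList (c1e ++ '|' :: c2e)

def get_skip_bigrams (orig_string : String) (k : Int) : List String :=
  if k < 1 then []  -- Python raises Exception here; excluded by Pre_
  else
    let ngrams := get_ngrams orig_string (2 + k)
    let processed := ngrams.foldl (fun acc ng => acc ++ [pvSkipGram ng]) []
    PySem.Set.ofList processed

-- ===== PORT B =====
-- esc = {'$': '<$>', '|': '<|>'}
def pvEscDict : PySem.Dict Char (List Char) := PySem.Dict.ofList [('$', ['<', '$', '>']), ('|', ['<', '|', '>'])]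

-- render one endpoint pair as an escaped skip-gram string
def pvPair (ab : Char × Char) : String :=
  String.ofList (PySem.Dict.getD pvEscDict ab.1 [ab.1] ++ '|' :: PySem.Dict.getD pvEscDict ab.2 [ab.2])

def get_skip_bigrams_alt (orig_string : String) (k : Int) : List String :=
  if k < 1 then []  -- B raises the same Exception; excluded by Pre_
  else
    let cs := orig_string.toList
    let n := k + 2
    PySem.Set.ofList
      (((PySem.List.pyRange 0 ((cs.length : Int) - n + 1) 1).map
          (fun i => (PySem.List.pyGetD cs i ' ', PySem.List.pyGetD cs (i + n - 1) ' '))).map pvPair)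

-- ===== PRECONDITION & SPEC =====
-- Pre_ excludes exactly k < 1, where A raises Exception('k must be >0') (and B raises too).
def Pre_get_skip_bigrams (orig_string : String) (k : Int) : Prop := 1 ≤ k
instance (orig_string : String) (k : Int) : Decidable (Pre_get_skip_bigrams orig_string k) := by
  unfold Pre_get_skip_bigrams; infer_instance
def pvWitness_get_skip_bigrams : String × Int := ("abcab", 1)

-- On strings of length exactly k+2 that begin or end with a literal escape sequence '<$>' or
-- '<|>', A un-escapes the raw input (an artifact of its escape/unescape round trip, which skips
-- the escape step for the lone full-size window) and returns that text's endpoints (e.g.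
-- '<$>|<$>' for '<$>'), while B returns the escaped actual endpoint characters (e.g. '<|>'),
-- the intended skip-bigram of the string.
def D_get_skip_bigrams (orig_string : String) (k : Int) : Prop :=
  PySem.Str.len orig_string = k + 2 ∧
    (PySem.Str.startswith orig_string "<$>" = true ∨ PySem.Str.startswith orig_string "<|>" = true ∨
     PySem.Str.endswith orig_string "<$>" = true ∨ PySem.Str.endswith orig_string "<|>" = true)
instance (orig_string : String) (k : Int) : Decidable (D_get_skip_bigrams orig_string k) := by
  unfold D_get_skip_bigrams; infer_instance

def Spec_get_skip_bigrams (orig_string : String) (k : Int) (out : List String) : Prop :=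
  ¬ D_get_skip_bigrams orig_string k → out = get_skip_bigrams_alt orig_string k
instance (orig_string : String) (k : Int) (out : List String) : Decidable (Spec_get_skip_bigrams orig_string k out) := by
  unfold Spec_get_skip_bigrams; infer_instance

def pvDiffWitness_get_skip_bigrams : String × Int := ("<$>", 1)
def pvDiffWitnessOut_get_skip_bigrams : (List String) × (List String) := (["<$>|<$>"], ["<|>"])

-- ===== CLAIM (what is proved, stated in full; the proofs are below) =====
def Claim_unchanged_get_skip_bigrams : Prop := ∀ (orig_string : String) (k : Int), Dom_get_skip_bigrams orig_string k → Pre_get_skip_bigrams orig_string k → Spec_get_skip_bigrams orig_string k (get_skip_bigrams orig_string k)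
def Claim_changed_get_skip_bigrams : Prop := Dom_get_skip_bigrams (pvDiffWitness_get_skip_bigrams.1) (pvDiffWitness_get_skip_bigrams.2) ∧ Pre_get_skip_bigrams (pvDiffWitness_get_skip_bigrams.1) (pvDiffWitness_get_skip_bigrams.2) ∧ D_get_skip_bigrams (pvDiffWitness_get_skip_bigrams.1) (pvDiffWitness_get_skip_bigrams.2) ∧ get_skip_bigrams (pvDiffWitness_get_skip_bigrams.1) (pvDiffWitness_get_skip_bigrams.2) = pvDiffWitnessOut_get_skip_bigrams.1 ∧ get_skip_bigrams_alt (pvDiffWitness_get_skip_bigrams.1) (pvDiffWitness_get_skip_bigrams.2) = pvDiffWitnessOut_get_skip_bigrams.2 ∧ pvDiffWitnessOut_get_skip_bigrams.1 ≠ pvDiffWitnessOut_get_skip_bigrams.2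

def Claim_exact_get_skip_bigrams : Prop := ∀ (orig_string : String) (k : Int), Dom_get_skip_bigrams orig_string k → Pre_get_skip_bigrams orig_string k → D_get_skip_bigrams orig_string k → get_skip_bigrams orig_string k ≠ get_skip_bigrams_alt orig_string k


-- ===== LEMMAS AND PROOFS =====

def pvE2 (c : Char) : List Char := if c = '|' then ['<', '|', '>'] else [c]
def pvEAll (c : Char) : List Char :=
  if c = '$' then ['<', '$', '>'] else if c = '|' then ['<', '|', '>'] else [c]
def pvG (w : List Char) : String :=
  String.ofList (pvEAll (w.headD ' ') ++ '|' :: pvEAll (w.getLastD ' '))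

def pvRep (old new : List Char) : List Char → List Char
  | [] => []
  | c :: t =>
    if h : old.isPrefixOf (c :: t) = true ∧ old ≠ [] then
      new ++ pvRep old new (List.drop old.length (c :: t))
    else c :: pvRep old new t
termination_by l => l.length
decreasing_by
  · have hle : 1 ≤ old.length := by
      cases old with
      | nil => exact absurd rfl h.2
      | cons a as => simp
    simp
    omega
  · simp

theorem pvRep_go (old new : List Char) (hold : old ≠ []) :
    ∀ fuel (l acc : List Char), l.length ≤ fuel →
      PySem.Chars.replace.go old new fuel l acc = acc.reverse ++ pvRep old new l := by
  intro fuel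
  induction fuel with
  | zero =>
    intro l acc hl
    have : l = [] := by simpa using hl
    subst this
    simp [PySem.Chars.replace.go, pvRep]
  | succ n ih =>
    intro l acc hl
    cases l with
    | nil => simp [PySem.Chars.replace.go, pvRep]
    | cons c t =>
      rw [PySem.Chars.replace.go]
      by_cases hp : old.isPrefixOf (c :: t) = true
      · rw [if_pos hp]
        have hlen : (List.drop old.length (c :: t)).length ≤ n := by
          have h1 : 1 ≤ old.length := by cases old with | nil => exact absurd rfl hold | cons a as => simp
          simp at hl ⊢
          omega
        rw [ih _ _ hlen]
        rw [pvRep, dif_pos ⟨hp, hold⟩]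
        simp
      · rw [if_neg hp]
        have hlen : t.length ≤ n := by simp at hl; omega
        rw [ih _ _ hlen]
        rw [pvRep, dif_neg (by simp [hp])]
        simp

theorem pvRep_replace (old new s : List Char) (hold : old ≠ []) :
    PySem.Chars.replace s old new = pvRep old new s := by
  rw [PySem.Chars.replace, if_neg (by simpa using hold)]
  simpa using pvRep_go old new hold s.length s [] le_rfl

theorem pvRep_single (c : Char) (new : List Char) (l : List Char) :
    pvRep [c] new l = l.flatMap (fun a => if a = c then new else [a]) := by
  induction l with
  | nil => simp [pvRep]
  | cons a t ih =>
    by_cases hac : a = c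
    · subst hac
      rw [pvRep, dif_pos (by simp [List.isPrefixOf])]
      simp [ih]
    · rw [pvRep, dif_neg (by simp [List.isPrefixOf]; intro h; exact hac h.symm)]
      simp [hac, ih]

theorem pvRep_cons (old new : List Char) (c : Char) (t : List Char) :
    pvRep old new (c :: t) =
      if old.isPrefixOf (c :: t) = true ∧ old ≠ [] then
        new ++ pvRep old new (List.drop old.length (c :: t))
      else c :: pvRep old new t := by
  by_cases hcond : old.isPrefixOf (c :: t) = true ∧ old ≠ []
  · rw [pvRep, dif_pos hcond, if_pos hcond]
  · rw [pvRep, dif_neg hcond, if_neg hcond]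

theorem pvPrefix3_iff (a b c x y z : Char) (r : List Char) :
    ([a, b, c] <+: (x :: y :: z :: r)) ↔ (a = x ∧ b = y ∧ c = z) := by
  simp [List.cons_prefix_cons]

theorem pvEsc_eq_flatMap (w : List Char) :
    PySem.Chars.replace (PySem.Chars.replace w ['$'] ['<', '$', '>']) ['|'] ['<', '|', '>']
      = w.flatMap pvEAll := by
  rw [pvRep_replace _ _ _ (by simp), pvRep_replace _ _ _ (by simp), pvRep_single, pvRep_single,
    List.flatMap_assoc]
  apply List.flatMap_congr
  intro c _
  by_cases h1 : c = '$' <;> by_cases h2 : c = '|' <;> simp_all [pvEAll]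

theorem pvFlat_head_ne (w : List Char) : (w.flatMap pvEAll).head? ≠ some '$' := by
  cases w with
  | nil => simp
  | cons c t =>
    by_cases h1 : c = '$' <;> by_cases h2 : c = '|' <;>
      simp_all [pvEAll, List.flatMap_cons]

theorem pvFlatE2_head_ne (w : List Char) : (w.flatMap pvE2).head? ≠ some '|' := by
  cases w with
  | nil => simp
  | cons c t =>
    by_cases h2 : c = '|' <;> simp_all [pvE2, List.flatMap_cons]

theorem pvEAll_ne_nil (c : Char) : pvEAll c ≠ [] := by
  by_cases h1 : c = '$' <;> by_cases h2 : c = '|' <;> simp_all [pvEAll]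

theorem pvFlat_ne_nil (w : List Char) (h : w ≠ []) : w.flatMap pvEAll ≠ [] := by
  cases w with
  | nil => simp at h
  | cons c t =>
    rw [List.flatMap_cons]
    intro hh
    exact pvEAll_ne_nil c (List.append_eq_nil_iff.mp hh).1

theorem pvFlat_last_ne (w : List Char) : (w.flatMap pvEAll).getLast? ≠ some '$' := by
  induction w using List.reverseRecOn with
  | nil => simp
  | append_singleton l c ih =>
    rw [List.flatMap_append, List.getLast?_append]
    by_cases h1 : c = '$' <;> by_cases h2 : c = '|' <;> simp_all [pvEAll]

theorem pvNoPrefix_of_head_ne (a : Char) (p l : List Char) (h : l.head? ≠ some a) :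
    ¬ ((a :: p) <+: l) := by
  cases l with
  | nil => simp
  | cons b t =>
    rw [List.cons_prefix_cons]
    rintro ⟨rfl, -⟩
    simp at h

theorem pvUnesc1 (w : List Char) :
    pvRep ['<', '$', '>'] ['$'] (w.flatMap pvEAll) = w.flatMap pvE2 := by
  induction w with
  | nil => simp [pvRep]
  | cons c t ih =>
    rw [List.flatMap_cons, List.flatMap_cons]
    by_cases h1 : c = '$'
    · subst h1
      show pvRep _ _ ('<' :: '$' :: '>' :: t.flatMap pvEAll) = _
      rw [pvRep_cons, if_pos ⟨by rw [List.isPrefixOf_iff_prefix]; exact ⟨t.flatMap pvEAll, rfl⟩, by simp⟩]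
      simpa [pvE2] using ih
    · by_cases h2 : c = '|'
      · subst h2
        show pvRep _ _ ('<' :: '|' :: '>' :: t.flatMap pvEAll) = _
        rw [pvRep_cons, if_neg (fun hcon => by
          rw [List.isPrefixOf_iff_prefix, pvPrefix3_iff] at hcon
          simp at hcon)]
        rw [pvRep_cons, if_neg (fun hcon => by
          rcases hcon with ⟨hp, -⟩
          rw [List.isPrefixOf_iff_prefix] at hp
          rcases List.cons_prefix_cons.mp hp with ⟨hc, -⟩
          exact absurd hc (by decide))]
        rw [pvRep_cons, if_neg (fun hcon => by
          rcases hcon with ⟨hp, -⟩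
          rw [List.isPrefixOf_iff_prefix] at hp
          rcases List.cons_prefix_cons.mp hp with ⟨hc, -⟩
          exact absurd hc (by decide))]
        simpa [pvE2] using ih
      · rw [show pvEAll c = [c] by simp [pvEAll, h1, h2], List.singleton_append]
        rw [pvRep_cons, if_neg ?hnp]
        case hnp =>
          rintro ⟨hp, -⟩
          rw [List.isPrefixOf_iff_prefix] at hp
          rcases List.cons_prefix_cons.mp hp with ⟨hc, hp2⟩
          exact pvNoPrefix_of_head_ne '$' ['>'] _ (pvFlat_head_ne t) hp2
        rw [ih, show pvE2 c = [c] by simp [pvE2, h2], List.singleton_append]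

theorem pvUnesc2 (w : List Char) :
    pvRep ['<', '|', '>'] ['|'] (w.flatMap pvE2) = w := by
  induction w with
  | nil => simp [pvRep]
  | cons c t ih =>
    rw [List.flatMap_cons]
    by_cases h2 : c = '|'
    · subst h2
      show pvRep _ _ ('<' :: '|' :: '>' :: t.flatMap pvE2) = _
      rw [pvRep_cons, if_pos ⟨by rw [List.isPrefixOf_iff_prefix]; exact ⟨t.flatMap pvE2, rfl⟩, by simp⟩]
      simpa using ih
    · rw [show pvE2 c = [c] by simp [pvE2, h2], List.singleton_append]
      rw [pvRep_cons, if_neg ?hnp]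
      case hnp =>
        rintro ⟨hp, -⟩
        rw [List.isPrefixOf_iff_prefix] at hp
        rcases List.cons_prefix_cons.mp hp with ⟨hc, hp2⟩
        exact pvNoPrefix_of_head_ne '|' ['>'] _ (pvFlatE2_head_ne t) hp2
      rw [ih]

theorem pvEscTok_eq (w : List Char) : pvEscTok w = w.flatMap pvEAll := pvEsc_eq_flatMap w

theorem pvUnescEsc (w : List Char) :
    PySem.Chars.replace (PySem.Chars.replace (w.flatMap pvEAll) ['<', '$', '>'] ['$'])
      ['<', '|', '>'] ['|'] = w := by
  rw [pvRep_replace _ _ _ (by simp), pvRep_replace _ _ _ (by simp), pvUnesc1, pvUnesc2]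

theorem pvEsc_single (c : Char) :
    PySem.Chars.replace (PySem.Chars.replace [c] ['$'] ['<', '$', '>']) ['|'] ['<', '|', '>']
      = pvEAll c := by
  rw [pvEsc_eq_flatMap]; simp

theorem pvSliceTail (c : Char) (l : List Char) :
    PySem.List.slice (c :: l) (some 1) none = l := by
  simp [PySem.List.slice, PySem.List.clampIdx]

theorem pvSliceInit (l : List Char) :
    PySem.List.slice l none (some (-1)) = l.dropLast := by
  cases l with
  | nil => decide
  | cons c t =>
    simp [PySem.List.slice, PySem.List.clampIdx, List.dropLast_eq_take]
    rw [if_neg (by omega)]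
    omega

theorem pvGetD_zero_headD (l : List Char) : PySem.List.pyGetD l 0 ' ' = l.headD ' ' := by
  rw [PySem.List.pyGetD_zero, List.headD_eq_head?]
  cases l <;> simp

theorem pvGetD_neg_one_getLastD (l : List Char) (h : l ≠ []) :
    PySem.List.pyGetD l (-1) ' ' = l.getLastD ' ' := by
  rw [PySem.List.pyGetD_neg_one l ' ' h, List.getLastD_eq_getLast?,
    List.getLast?_eq_some_getLast h]
  simp

theorem pvCond0_false (w : List Char) (hw : w ≠ []) :
    (PySem.List.pyGetD (w.flatMap pvEAll) 0 ' ' == '$') = false := by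
  have hEne := pvFlat_ne_nil w hw
  rw [pvGetD_zero_headD]
  have hh := pvFlat_head_ne w
  cases hC : (w.flatMap pvEAll) with
  | nil => exact absurd hC hEne
  | cons c0 E0 =>
    rw [hC] at hh
    simp only [List.head?_cons, ne_eq, Option.some.injEq] at hh
    simp [hh]

theorem pvCond1_false (w : List Char) (hw : w ≠ []) :
    (PySem.List.pyGetD (w.flatMap pvEAll) (-1) ' ' == '$') = false := by
  have hEne := pvFlat_ne_nil w hw
  rw [pvGetD_neg_one_getLastD _ hEne, List.getLastD_eq_getLast?,
    List.getLast?_eq_some_getLast hEne]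
  have hl := pvFlat_last_ne w
  rw [List.getLast?_eq_some_getLast hEne] at hl
  simp only [ne_eq, Option.some.injEq] at hl
  simp [hl]

theorem pvCond0_false' (w : List Char) (hw : w ≠ []) :
    ¬ ((PySem.List.pyGetD (w.flatMap pvEAll) 0 ' ' == '$') = true) := by
  rw [pvCond0_false w hw]; simp

theorem pvCond1_false' (w : List Char) (hw : w ≠ []) :
    ¬ ((PySem.List.pyGetD (w.flatMap pvEAll) (-1) ' ' == '$') = true) := by
  rw [pvCond1_false w hw]; simp

theorem pvCore_plain (w : List Char) (hw : w ≠ []) :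
    pvSkipGram (String.ofList (w.flatMap pvEAll)) = pvG w := by
  simp only [pvSkipGram, String.toList_ofList]
  rw [if_neg (pvCond0_false' w hw), if_neg (pvCond1_false' w hw)]
  rw [pvUnescEsc, pvGetD_zero_headD, pvGetD_neg_one_getLastD _ hw, pvEsc_single, pvEsc_single, pvG]

theorem pvCore_pre (w : List Char) (hw : w ≠ []) :
    pvSkipGram (String.ofList ('$' :: w.flatMap pvEAll)) = pvG w := by
  simp only [pvSkipGram, String.toList_ofList]
  rw [if_pos (show (PySem.List.pyGetD ('$' :: w.flatMap pvEAll) 0 ' ' == '$') = true by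
      rw [PySem.List.pyGetD_zero_cons]; simp), pvSliceTail]
  rw [if_neg (pvCond1_false' w hw)]
  rw [pvUnescEsc, pvGetD_zero_headD, pvGetD_neg_one_getLastD _ hw, pvEsc_single, pvEsc_single, pvG]

theorem pvCore_suf (w : List Char) (hw : w ≠ []) :
    pvSkipGram (String.ofList (w.flatMap pvEAll ++ ['$'])) = pvG w := by
  have hEne := pvFlat_ne_nil w hw
  simp only [pvSkipGram, String.toList_ofList]
  rw [if_neg (show ¬ ((PySem.List.pyGetD (w.flatMap pvEAll ++ ['$']) 0 ' ' == '$') = true) by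
      rw [pvGetD_zero_headD, List.headD_eq_head?, List.head?_append]
      have hh := pvFlat_head_ne w
      cases hC : (w.flatMap pvEAll) with
      | nil => exact absurd hC hEne
      | cons c0 E0 =>
        rw [hC] at hh
        simp only [List.head?_cons, ne_eq, Option.some.injEq] at hh
        simp [hh])]
  rw [if_pos (show (PySem.List.pyGetD (w.flatMap pvEAll ++ ['$']) (-1) ' ' == '$') = true by
      rw [PySem.List.pyGetD_neg_one_append_singleton]; simp)]
  rw [pvSliceInit, List.dropLast_concat]
  rw [pvUnescEsc, pvGetD_zero_headD, pvGetD_neg_one_getLastD _ hw, pvEsc_single, pvEsc_single, pvG]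

theorem pvStep (bg eg w : List Char) (fb fe : Bool) (acc : List (List Char)) (hw : w ≠ []) :
    ∃ b e v, pvNgramStep bg eg (fb, fe, acc) w = (b, e, acc ++ [v]) ∧
      pvSkipGram (String.ofList v) = pvG w := by
  simp only [pvNgramStep]
  split_ifs with h1 h2
  · exact ⟨true, fe, '$' :: pvEscTok w, rfl, by rw [pvEscTok_eq]; exact pvCore_pre w hw⟩
  · exact ⟨fb, true, pvEscTok w ++ ['$'], rfl, by rw [pvEscTok_eq]; exact pvCore_suf w hw⟩
  · exact ⟨fb, fe, pvEscTok w, rfl, by rw [pvEscTok_eq]; exact pvCore_plain w hw⟩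

theorem pvFold_map (bg eg : List Char) :
    ∀ (ws : List (List Char)) (fb fe : Bool) (acc : List (List Char)),
      (∀ w ∈ ws, w ≠ []) →
      ((ws.foldl (pvNgramStep bg eg) (fb, fe, acc)).2.2).map (fun t => pvSkipGram (String.ofList t)) =
        acc.map (fun t => pvSkipGram (String.ofList t)) ++ ws.map pvG := by
  intro ws
  induction ws with
  | nil => intro fb fe acc _; simp
  | cons w ws ih =>
    intro fb fe acc h
    have hw : w ≠ [] := h w (by simp)
    have hws : ∀ v ∈ ws, v ≠ [] := fun v hv => h v (by simp [hv])
    obtain ⟨b, e, v, hstep, hval⟩ := pvStep bg eg w fb fe acc hw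
    rw [List.foldl_cons, hstep, ih b e _ hws, List.map_append]
    simp [hval]

theorem pvAdd_mem {α : Type} [BEq α] [LawfulBEq α] (s : PySem.Set α) (x : α) (h : x ∈ s) :
    PySem.Set.add s x = s := by
  simp [PySem.Set.add, PySem.Set.contains, List.contains_eq_mem, h]

theorem pvAdd_not_mem {α : Type} [BEq α] [LawfulBEq α] (s : PySem.Set α) (x : α) (h : ¬ x ∈ s) :
    PySem.Set.add s x = s ++ [x] := by
  simp [PySem.Set.add, PySem.Set.contains, List.contains_eq_mem, h]

theorem pvSet_ofList_map_ofList {α β : Type} [BEq α] [LawfulBEq α] [BEq β] [LawfulBEq β]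
    (f : α → β) (l : List α) :
    PySem.Set.ofList ((PySem.Set.ofList l).map f) = PySem.Set.ofList (l.map f) := by
  induction l using List.reverseRecOn with
  | nil => rfl
  | append_singleton t x ih =>
    rw [PySem.Set.ofList_append_singleton, List.map_append, List.map_singleton,
      PySem.Set.ofList_append_singleton]
    by_cases hx : x ∈ t
    · rw [pvAdd_mem _ _ (by rw [PySem.Set.mem_ofList]; exact hx), ih,
        pvAdd_mem _ _ (by rw [PySem.Set.mem_ofList]; exact List.mem_map_of_mem hx)]
    · rw [pvAdd_not_mem _ _ (by rw [PySem.Set.mem_ofList]; exact hx), List.map_append,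
        List.map_singleton, PySem.Set.ofList_append_singleton, ih]

theorem pvEscDict_getD (c : Char) : PySem.Dict.getD pvEscDict c [c] = pvEAll c := by
  by_cases h1 : c = '$'
  · subst h1; decide
  · by_cases h2 : c = '|'
    · subst h2; decide
    · have e1 : ('$' == c) = false := by
        simp only [beq_eq_false_iff_ne, ne_eq]; exact fun h => h1 h.symm
      have e2 : ('|' == c) = false := by
        simp only [beq_eq_false_iff_ne, ne_eq]; exact fun h => h2 h.symm
      simp [pvEscDict, PySem.Dict.getD, PySem.Dict.get?, PySem.Dict.ofList,
        PySem.Dict.update, PySem.Dict.insert, PySem.Dict.empty, PySem.Dict.contains,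
        List.find?, pvEAll, h1, h2, e1, e2]

theorem pvRange_nonpos (m : Int) (h : m ≤ 0) : PySem.List.pyRange 0 m 1 = [] := by
  simp [PySem.List.pyRange]
  omega

theorem pvSliceWindow (cs : List Char) (x n : Int) (h0 : 0 ≤ x) (hn : 0 < n)
    (h1 : x + n ≤ (cs.length : Int)) :
    PySem.List.slice cs (some x) (some (x + n)) = (cs.drop x.toNat).take n.toNat := by
  simp only [PySem.List.slice, PySem.List.clampIdx]
  rw [if_neg (by omega), if_neg (by omega)]
  have hx : min x.toNat cs.length = x.toNat := by omega
  have hxn : min (x + n).toNat cs.length = (x + n).toNat := by omega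
  rw [hx, hxn]
  congr 1
  omega

theorem pvWindow_head (cs : List Char) (j N : Nat) (hN : 0 < N) (hjN : j + N ≤ cs.length) :
    ((cs.drop j).take N).headD ' ' = cs[j]'(by omega) := by
  have hlen : ((cs.drop j).take N).length = N := by
    simp [List.length_take, List.length_drop]; omega
  have hne : ((cs.drop j).take N) ≠ [] := by
    intro hh; rw [hh] at hlen; simp at hlen; omega
  rw [List.headD_eq_head?, List.head?_eq_getElem?, List.getElem?_eq_getElem (by omega)]
  simp only [Option.getD_some]
  rw [List.getElem_take, List.getElem_drop]
  congr 1

theorem pvWindow_last (cs : List Char) (j N : Nat) (hN : 0 < N) (hjN : j + N ≤ cs.length) :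
    ((cs.drop j).take N).getLastD ' ' = cs[j + N - 1]'(by omega) := by
  have hlen : ((cs.drop j).take N).length = N := by
    simp [List.length_take, List.length_drop]; omega
  rw [List.getLastD_eq_getLast?, List.getLast?_eq_getElem?, hlen,
    List.getElem?_eq_getElem (by omega)]
  simp only [Option.getD_some]
  rw [List.getElem_take, List.getElem_drop]
  congr 1
  omega

-- ── head/last preservation of the unescape on strings not starting/ending with an escape ──

theorem pvRep_ne_nil (old new l : List Char) (hl : l ≠ []) (hnew : new ≠ []) :
    pvRep old new l ≠ [] := by
  cases l with
  | nil => exact absurd rfl hl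
  | cons c t =>
    rw [pvRep_cons]
    split_ifs with h
    · simp [hnew]
    · simp

theorem pvRep_head? (old new l : List Char) (h : ¬ old <+: l) :
    (pvRep old new l).head? = l.head? := by
  cases l with
  | nil => simp [pvRep]
  | cons c t =>
    rw [pvRep_cons, if_neg (fun hc => h (List.isPrefixOf_iff_prefix.mp hc.1))]
    simp

theorem pvRep_getLast?_fuel (old new : List Char) (hnew : new ≠ []) (hold : old ≠ []) :
    ∀ (N : Nat) (l : List Char), l.length ≤ N → ¬ old <:+ l →
      (pvRep old new l).getLast? = l.getLast? := by
  intro N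
  induction N with
  | zero =>
    intro l hl _
    have : l = [] := by simpa using hl
    subst this; simp [pvRep]
  | succ n ih =>
    intro l hl hsuf
    cases l with
    | nil => simp [pvRep]
    | cons c t =>
      rw [pvRep_cons]
      split_ifs with hc
      · -- front match: c::t = old ++ rest, rest ≠ []
        have hp : old <+: (c :: t) := List.isPrefixOf_iff_prefix.mp hc.1
        obtain ⟨rest, hrest⟩ := hp
        have hdrop : List.drop old.length (c :: t) = rest := by
          rw [← hrest]; simp
        have hrne : rest ≠ [] := by
          intro h0; rw [h0, List.append_nil] at hrest; exact hsuf ⟨[], by simpa using hrest⟩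
        have hrs : rest <:+ (c :: t) := ⟨old, hrest⟩
        have hlen : rest.length ≤ n := by
          have := congrArg List.length hrest
          simp at this hl
          have h1 : 1 ≤ old.length := by
            cases old with | nil => exact absurd rfl hold | cons a as => simp
          omega
        rw [hdrop, List.getLast?_append_of_ne_nil _ (pvRep_ne_nil old new rest hrne hnew),
          ih rest hlen (fun hh => hsuf (hh.trans hrs)), ← hrest,
          List.getLast?_append_of_ne_nil _ hrne]
      · cases t with
        | nil => simp [pvRep]
        | cons d t' =>
          have hts : (d :: t') <:+ (c :: d :: t') := ⟨[c], rfl⟩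
          have hlen : (d :: t').length ≤ n := by simp at hl ⊢; omega
          have hrec := ih (d :: t') hlen (fun hh => hsuf (hh.trans hts))
          have hne1 : pvRep old new (d :: t') ≠ [] := pvRep_ne_nil old new _ (by simp) hnew
          rw [show (c :: pvRep old new (d :: t')) = [c] ++ pvRep old new (d :: t') from rfl,
            List.getLast?_append_of_ne_nil _ hne1, hrec,
            show (c :: d :: t') = [c] ++ (d :: t') from rfl,
            List.getLast?_append_of_ne_nil _ (by simp)]

theorem pvRep_getLast? (old new l : List Char) (hnew : new ≠ []) (hold : old ≠ [])
    (h : ¬ old <:+ l) : (pvRep old new l).getLast? = l.getLast? := by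
  exact pvRep_getLast?_fuel old new hnew hold l.length l le_rfl h

-- inversion: if the first replace produced a char ≠ '$' in front, it was there in the source
theorem pvRepA_cons_inv (l r : List Char) (c : Char) (hc : c ≠ '$')
    (h : pvRep ['<', '$', '>'] ['$'] l = c :: r) :
    ∃ t, l = c :: t ∧ pvRep ['<', '$', '>'] ['$'] t = r := by
  cases l with
  | nil => simp [pvRep] at h
  | cons d t =>
    rw [pvRep_cons] at h
    split_ifs at h with hm
    · rw [List.singleton_append] at h
      exact absurd (List.cons.injEq .. ▸ h).1.symm hc
    · obtain ⟨h1, h2⟩ := List.cons.injEq .. ▸ h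
      exact ⟨t, by rw [h1], h2⟩

theorem pvB_prefix_of (s : List Char)
    (hB : ['<', '|', '>'] <+: pvRep ['<', '$', '>'] ['$'] s) : ['<', '|', '>'] <+: s := by
  obtain ⟨u, hu⟩ := hB
  obtain ⟨t1, ht1, hr1⟩ := pvRepA_cons_inv s ('|' :: '>' :: u) '<' (by decide) hu.symm
  obtain ⟨t2, ht2, hr2⟩ := pvRepA_cons_inv t1 ('>' :: u) '|' (by decide) hr1
  obtain ⟨t3, ht3, -⟩ := pvRepA_cons_inv t2 u '>' (by decide) hr2
  exact ⟨t3, by rw [ht1, ht2, ht3]; rfl⟩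

theorem pvB_suffix_of_fuel :
    ∀ (N : Nat) (s : List Char), s.length ≤ N → ¬ ['<', '$', '>'] <:+ s →
      ['<', '|', '>'] <:+ pvRep ['<', '$', '>'] ['$'] s → ['<', '|', '>'] <:+ s := by
  intro N
  induction N with
  | zero =>
    intro s hl _ hB
    have : s = [] := by simpa using hl
    subst this
    simp [pvRep] at hB
  | succ n ih =>
    intro s hl hA hB
    cases s with
    | nil =>
      simp [pvRep] at hB
    | cons c t =>
      rw [pvRep_cons] at hB
      split_ifs at hB with hm
      · have hp : ['<', '$', '>'] <+: (c :: t) := List.isPrefixOf_iff_prefix.mp hm.1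
        obtain ⟨rest, hrest⟩ := hp
        have hdrop : List.drop (3 : Nat) (c :: t) = rest := by
          rw [← hrest]; rfl
        have hrs : rest <:+ (c :: t) := ⟨['<', '$', '>'], hrest⟩
        rw [show (['<', '$', '>'] : List Char).length = 3 from rfl, hdrop,
          List.singleton_append] at hB
        rcases List.suffix_cons_iff.mp hB with hw | hx
        · injection hw with h1 _
          exact absurd h1 (by decide)
        · have hlen : rest.length ≤ n := by
            have := congrArg List.length hrest
            simp at this hl; omega
          exact (ih rest hlen (fun hh => hA (hh.trans hrs)) hx).trans hrs
      · rcases List.suffix_cons_iff.mp hB with hw | hx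
        · -- whole: ['<','|','>'] = c :: pvRep t, so c = '<' and pvRep t = ['|','>']
          injection hw with h1 h2
          obtain ⟨t2, ht2, hr2⟩ := pvRepA_cons_inv t ['>'] '|' (by decide) h2.symm
          obtain ⟨t3, ht3, hr3⟩ := pvRepA_cons_inv t2 [] '>' (by decide) hr2
          have ht3nil : t3 = [] := by
            by_contra hne
            exact pvRep_ne_nil _ _ t3 hne (by simp) hr3
          subst ht3nil
          refine ⟨[], ?_⟩
          simp [← h1, ht2, ht3]
        · cases t with
          | nil =>
            simp [pvRep] at hx
          | cons d t' =>
            have hts : (d :: t') <:+ (c :: d :: t') := ⟨[c], rfl⟩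
            have hlen : (d :: t').length ≤ n := by simp at hl ⊢; omega
            exact (ih (d :: t') hlen (fun hh => hA (hh.trans hts)) hx).trans hts

theorem pvB_suffix_of (s : List Char) (hA : ¬ ['<', '$', '>'] <:+ s)
    (hB : ['<', '|', '>'] <:+ pvRep ['<', '$', '>'] ['$'] s) : ['<', '|', '>'] <:+ s :=
  pvB_suffix_of_fuel s.length s le_rfl hA hB

-- on a string with no escape sequence at either boundary, unescape preserves the endpoints
theorem pvUnesc_head? (s : List Char) (h1 : ¬ ['<', '$', '>'] <+: s)
    (h2 : ¬ ['<', '|', '>'] <+: s) :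
    (PySem.Chars.replace (PySem.Chars.replace s ['<', '$', '>'] ['$']) ['<', '|', '>'] ['|']).head?
      = s.head? := by
  rw [pvRep_replace _ _ _ (by simp), pvRep_replace _ _ _ (by simp)]
  rw [pvRep_head? _ _ _ (fun hh => h2 (pvB_prefix_of s hh)), pvRep_head? _ _ _ h1]

theorem pvUnesc_getLast? (s : List Char) (h1 : ¬ ['<', '$', '>'] <:+ s)
    (h2 : ¬ ['<', '|', '>'] <:+ s) :
    (PySem.Chars.replace (PySem.Chars.replace s ['<', '$', '>'] ['$']) ['<', '|', '>'] ['|']).getLast?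
      = s.getLast? := by
  rw [pvRep_replace _ _ _ (by simp), pvRep_replace _ _ _ (by simp)]
  rw [pvRep_getLast? _ _ _ (by simp) (by simp) (fun hh => h2 (pvB_suffix_of s h1 hh)),
    pvRep_getLast? _ _ _ (by simp) (by simp) h1]

theorem pvUnesc_ne_nil (s : List Char) (hs : s ≠ []) :
    PySem.Chars.replace (PySem.Chars.replace s ['<', '$', '>'] ['$']) ['<', '|', '>'] ['|'] ≠ [] := by
  rw [pvRep_replace _ _ _ (by simp), pvRep_replace _ _ _ (by simp)]
  exact pvRep_ne_nil _ _ _ (pvRep_ne_nil _ _ _ hs (by simp)) (by simp)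


-- ── lemmas for the tightness theorem (A ≠ B everywhere inside D_) ──

theorem pvSet_single (x : String) : PySem.Set.ofList [x] = [x] := rfl

theorem pvA_exact (orig : String) (k : Int) (hk : 1 ≤ k)
    (heq : (orig.toList.length : Int) = 2 + k) (hsne : orig.toList ≠ []) :
    get_skip_bigrams orig k =
      [String.ofList
        (pvEAll ((PySem.Chars.replace (PySem.Chars.replace orig.toList ['<', '$', '>'] ['$'])
            ['<', '|', '>'] ['|']).headD ' ') ++
          '|' :: pvEAll ((PySem.Chars.replace (PySem.Chars.replace orig.toList ['<', '$', '>'] ['$'])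
            ['<', '|', '>'] ['|']).getLastD ' '))] := by
  simp only [get_skip_bigrams, if_neg (show ¬ k < 1 by omega), get_ngrams]
  rw [if_neg (by omega), if_pos heq]
  rw [show List.foldl (fun acc ng => acc ++ [pvSkipGram ng]) []
        [String.ofList ('$' :: orig.toList ++ ['$'])] =
        [pvSkipGram (String.ofList ('$' :: orig.toList ++ ['$']))] from rfl]
  rw [pvSet_single]
  apply congrArg (fun x => [x])
  simp only [pvSkipGram, String.toList_ofList, List.cons_append]
  rw [if_pos (show (PySem.List.pyGetD ('$' :: (orig.toList ++ ['$'])) 0 ' ' == '$') = true by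
        rw [PySem.List.pyGetD_zero_cons]; simp)]
  rw [pvSliceTail]
  rw [if_pos (show (PySem.List.pyGetD (orig.toList ++ ['$']) (-1) ' ' == '$') = true by
        rw [PySem.List.pyGetD_neg_one_append_singleton]; simp)]
  rw [pvSliceInit, List.dropLast_concat, pvGetD_zero_headD,
    pvGetD_neg_one_getLastD _ (pvUnesc_ne_nil _ hsne), pvEsc_single, pvEsc_single]

theorem pvB_exact (orig : String) (k : Int) (hk : 1 ≤ k)
    (heq : (orig.toList.length : Int) = 2 + k) (hsne : orig.toList ≠ []) :
    get_skip_bigrams_alt orig k =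
      [String.ofList (pvEAll (orig.toList.headD ' ') ++ '|' :: pvEAll (orig.toList.getLastD ' '))] := by
  simp only [get_skip_bigrams_alt, if_neg (show ¬ k < 1 by omega)]
  rw [show (orig.toList.length : Int) - (k + 2) + 1 = 1 by omega,
    show PySem.List.pyRange 0 1 1 = [0] by decide]
  simp only [List.map_cons, List.map_nil]
  rw [pvSet_single]
  apply congrArg (fun x => [x])
  simp only [pvPair]
  rw [pvEscDict_getD, pvEscDict_getD, pvGetD_zero_headD]
  rw [PySem.List.pyGetD_eq_getElem _ ' ' (by omega) (by omega)]
  rw [show orig.toList[((0 : Int) + (k + 2) - 1).toNat]'(by omega) = orig.toList.getLastD ' ' by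
    rw [List.getLastD_eq_getLast?, List.getLast?_eq_some_getLast hsne, Option.getD_some,
      List.getLast_eq_getElem]
    congr 1
    omega]

theorem pvRender_inj (a b c d : Char)
    (h : pvEAll a ++ '|' :: pvEAll b = pvEAll c ++ '|' :: pvEAll d) : a = c ∧ b = d := by
  by_cases ha1 : a = '$' <;> by_cases ha2 : a = '|' <;> by_cases hc1 : c = '$' <;>
    by_cases hc2 : c = '|' <;> by_cases hb1 : b = '$' <;> by_cases hb2 : b = '|' <;>
      by_cases hd1 : d = '$' <;> by_cases hd2 : d = '|' <;>
        simp_all [pvEAll]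

-- after a replace, a string ending in the searched triple ends in the replacement character
theorem pvLast_of_suffix (o1 o2 o3 nc : Char) (h2 : o2 ≠ o1) (h3 : o3 ≠ o1) :
    ∀ (N : Nat) (s : List Char), s.length ≤ N → [o1, o2, o3] <:+ s →
      (pvRep [o1, o2, o3] [nc] s).getLast? = some nc := by
  intro N
  induction N with
  | zero =>
    intro s hl hsuf
    have : s = [] := by simpa using hl
    subst this
    rcases hsuf with ⟨p, hp⟩
    simp at hp
  | succ n ih =>
    intro s hl hsuf
    cases s with
    | nil =>
      rcases hsuf with ⟨p, hp⟩
      simp at hp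
    | cons c t =>
      rw [pvRep_cons]
      rcases hsuf with ⟨p, hp⟩
      split_ifs with hm
      · have hpre : [o1, o2, o3] <+: (c :: t) := List.isPrefixOf_iff_prefix.mp hm.1
        obtain ⟨rest, hrest⟩ := hpre
        have hdrop : List.drop ([o1, o2, o3] : List Char).length (c :: t) = rest := by
          rw [← hrest]; rfl
        rw [hdrop]
        have hcomb : p ++ [o1, o2, o3] = [o1, o2, o3] ++ rest := hp.trans hrest.symm
        match p, hcomb with
        | [], hcomb =>
          have hrnil : rest = [] := by simpa using hcomb.symm
          subst hrnil
          simp [pvRep]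
        | [a], hcomb =>
          simp only [List.cons_append, List.nil_append, List.cons.injEq] at hcomb
          exact absurd hcomb.2.1.symm h2
        | [a, b], hcomb =>
          simp only [List.cons_append, List.nil_append, List.cons.injEq] at hcomb
          exact absurd hcomb.2.2.1.symm h3
        | a :: b :: c' :: q, hcomb =>
          simp only [List.cons_append, List.nil_append, List.cons.injEq] at hcomb
          have hq : q ++ [o1, o2, o3] = rest := hcomb.2.2.2
          have hrne : rest ≠ [] := by
            rw [← hq]; simp
          have hlen : rest.length ≤ n := by
            have := congrArg List.length hrest
            simp at this hl
            omega
          rw [List.getLast?_append_of_ne_nil _ (pvRep_ne_nil _ _ _ hrne (by simp))]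
          exact ih rest hlen ⟨q, hq⟩
      · match p, hp with
        | [], hp =>
          exact absurd ⟨by rw [List.isPrefixOf_iff_prefix, ← List.nil_append ([o1, o2, o3]), hp],
            by simp⟩ hm
        | a :: p', hp =>
          have hp' : p' ++ [o1, o2, o3] = t := by
            have := hp
            simp only [List.cons_append, List.cons.injEq] at this
            exact this.2
          have htne : t ≠ [] := by rw [← hp']; simp
          have hlen : t.length ≤ n := by simp at hl; omega
          rw [show (c :: pvRep [o1, o2, o3] [nc] t) = [c] ++ pvRep [o1, o2, o3] [nc] t from rfl,
            List.getLast?_append_of_ne_nil _ (pvRep_ne_nil _ _ _ htne (by simp))]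
          exact ih t hlen ⟨p', hp'⟩

-- the '<$>' → '$' replace keeps a trailing '<|>'
theorem pvKeepB_suffix :
    ∀ (N : Nat) (s : List Char), s.length ≤ N → ['<', '|', '>'] <:+ s →
      ['<', '|', '>'] <:+ pvRep ['<', '$', '>'] ['$'] s := by
  intro N
  induction N with
  | zero =>
    intro s hl hsuf
    have : s = [] := by simpa using hl
    subst this
    rcases hsuf with ⟨p, hp⟩
    simp at hp
  | succ n ih =>
    intro s hl hsuf
    cases s with
    | nil =>
      rcases hsuf with ⟨p, hp⟩
      simp at hp
    | cons c t =>
      rw [pvRep_cons]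
      rcases hsuf with ⟨p, hp⟩
      split_ifs with hm
      · have hpre : ['<', '$', '>'] <+: (c :: t) := List.isPrefixOf_iff_prefix.mp hm.1
        obtain ⟨rest, hrest⟩ := hpre
        have hdrop : List.drop (['<', '$', '>'] : List Char).length (c :: t) = rest := by
          rw [← hrest]; rfl
        rw [hdrop]
        have hcomb : p ++ ['<', '|', '>'] = ['<', '$', '>'] ++ rest := hp.trans hrest.symm
        match p, hcomb with
        | [], hcomb => simp at hcomb
        | [a], hcomb => simp at hcomb
        | [a, b], hcomb => simp at hcomb
        | a :: b :: c' :: q, hcomb =>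
          simp only [List.cons_append, List.nil_append, List.cons.injEq] at hcomb
          have hq : q ++ ['<', '|', '>'] = rest := hcomb.2.2.2
          have hlen : rest.length ≤ n := by
            have := congrArg List.length hrest
            simp at this hl
            omega
          exact (ih rest hlen ⟨q, hq⟩).trans (List.suffix_append _ _)
      · match p, hp with
        | [], hp =>
          -- the whole string is '<|>' itself
          have hc : c = '<' := by
            have := hp
            simp only [List.nil_append, List.cons.injEq] at this
            exact this.1.symm
          have ht : t = ['|', '>'] := by
            have := hp
            simp only [List.nil_append, List.cons.injEq] at this
            exact this.2.symm
          subst hc; subst ht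
          refine ⟨[], ?_⟩
          rw [show pvRep ['<', '$', '>'] ['$'] ['|', '>'] = ['|', '>'] by
            rw [pvRep_cons, if_neg (by rintro ⟨hx, -⟩; simp [List.isPrefixOf] at hx),
              pvRep_cons, if_neg (by rintro ⟨hx, -⟩; simp [List.isPrefixOf] at hx)]
            simp [pvRep]]
          rfl
        | a :: p', hp =>
          have hp' : p' ++ ['<', '|', '>'] = t := by
            have := hp
            simp only [List.cons_append, List.cons.injEq] at this
            exact this.2
          have hlen : t.length ≤ n := by simp at hl; omega
          exact (ih t hlen ⟨p', hp'⟩).trans ⟨[c], rfl⟩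

-- ===== VERDICT =====
theorem get_skip_bigrams_spec : Claim_unchanged_get_skip_bigrams := by
  intro orig k _ hpre hnd
  have hk : 1 ≤ k := hpre
  show get_skip_bigrams orig k = get_skip_bigrams_alt orig k
  simp only [get_skip_bigrams, get_skip_bigrams_alt, if_neg (show ¬ k < 1 by omega)]
  simp only [get_ngrams]
  by_cases hlt : ((orig.toList.length : Int)) < 2 + k
  · rw [if_pos hlt]
    rw [pvRange_nonpos ((orig.toList.length : Int) - (k + 2) + 1) (by omega)]
    rfl
  · by_cases heq : ((orig.toList.length : Int)) = 2 + k
    · -- exact length: one window; outside D_ the unescape keeps both endpoints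
      have hslen : (orig.toList.length : Int) = k + 2 := by omega
      have hD1 : PySem.Str.len orig = k + 2 := by rw [PySem.Str.len_eq]; exact hslen
      have hnq : ¬ (PySem.Str.startswith orig "<$>" = true ∨ PySem.Str.startswith orig "<|>" = true ∨
          PySem.Str.endswith orig "<$>" = true ∨ PySem.Str.endswith orig "<|>" = true) := by
        intro hq
        exact hnd ⟨hD1, hq⟩
      push_neg at hnq
      obtain ⟨hq1, hq2, hq3, hq4⟩ := hnq
      have hp1 : ¬ (['<', '$', '>'] <+: orig.toList) := by
        intro hh
        refine hq1 ?_
        rw [PySem.Str.startswith_eq, show ("<$>" : String).toList = ['<', '$', '>'] from rfl]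
        exact (PySem.Chars.startswith_iff _ _).mpr hh
      have hp2 : ¬ (['<', '|', '>'] <+: orig.toList) := by
        intro hh
        refine hq2 ?_
        rw [PySem.Str.startswith_eq, show ("<|>" : String).toList = ['<', '|', '>'] from rfl]
        exact (PySem.Chars.startswith_iff _ _).mpr hh
      have hs1 : ¬ (['<', '$', '>'] <:+ orig.toList) := by
        intro hh
        refine hq3 ?_
        rw [PySem.Str.endswith_eq, show ("<$>" : String).toList = ['<', '$', '>'] from rfl]
        exact (PySem.Chars.endswith_iff _ _).mpr hh
      have hs2 : ¬ (['<', '|', '>'] <:+ orig.toList) := by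
        intro hh
        refine hq4 ?_
        rw [PySem.Str.endswith_eq, show ("<|>" : String).toList = ['<', '|', '>'] from rfl]
        exact (PySem.Chars.endswith_iff _ _).mpr hh
      have hsne : orig.toList ≠ [] := by
        intro h0; rw [h0] at hslen; simp at hslen; omega
      rw [if_neg hlt, if_pos heq]
      rw [show List.foldl (fun acc ng => acc ++ [pvSkipGram ng]) []
            [String.ofList ('$' :: orig.toList ++ ['$'])] =
            [pvSkipGram (String.ofList ('$' :: orig.toList ++ ['$']))] from rfl]
      rw [show (orig.toList.length : Int) - (k + 2) + 1 = 1 by omega,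
        show PySem.List.pyRange 0 1 1 = [0] by decide]
      simp only [List.map_cons, List.map_nil]
      apply congrArg
      apply congrArg (fun x => [x])
      -- A's lone gram '$'+s+'$' is stripped back to s and unescaped; outside D_ the
      -- unescape keeps both endpoint characters, so it equals B's escaped endpoint pair
      simp only [pvSkipGram, pvPair, String.toList_ofList, List.cons_append]
      rw [if_pos (show (PySem.List.pyGetD ('$' :: (orig.toList ++ ['$'])) 0 ' ' == '$') = true by
            rw [PySem.List.pyGetD_zero_cons]; simp)]
      rw [pvSliceTail]
      rw [if_pos (show (PySem.List.pyGetD (orig.toList ++ ['$']) (-1) ' ' == '$') = true by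
            rw [PySem.List.pyGetD_neg_one_append_singleton]; simp)]
      rw [pvSliceInit, List.dropLast_concat]
      have hune : PySem.Chars.replace (PySem.Chars.replace orig.toList ['<', '$', '>'] ['$'])
          ['<', '|', '>'] ['|'] ≠ [] := pvUnesc_ne_nil _ hsne
      have hhead : PySem.List.pyGetD (PySem.Chars.replace
          (PySem.Chars.replace orig.toList ['<', '$', '>'] ['$']) ['<', '|', '>'] ['|']) 0 ' '
          = PySem.List.pyGetD orig.toList 0 ' ' := by
        rw [pvGetD_zero_headD, pvGetD_zero_headD, List.headD_eq_head?, List.headD_eq_head?,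
          pvUnesc_head? _ hp1 hp2]
      have hlastU : PySem.List.pyGetD (PySem.Chars.replace
          (PySem.Chars.replace orig.toList ['<', '$', '>'] ['$']) ['<', '|', '>'] ['|']) (-1) ' '
          = orig.toList.getLastD ' ' := by
        rw [pvGetD_neg_one_getLastD _ hune, List.getLastD_eq_getLast?, List.getLastD_eq_getLast?,
          pvUnesc_getLast? _ hs1 hs2]
      have hlastB : PySem.List.pyGetD orig.toList (0 + (k + 2) - 1) ' '
          = orig.toList.getLastD ' ' := by
        rw [PySem.List.pyGetD_eq_getElem _ ' ' (by omega) (by omega)]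
        rw [List.getLastD_eq_getLast?, List.getLast?_eq_some_getLast hsne, Option.getD_some,
          List.getLast_eq_getElem]
        congr 1
        omega
      rw [hhead, hlastU, hlastB, pvEsc_single, pvEsc_single, pvEscDict_getD, pvEscDict_getD,
        pvGetD_zero_headD]
    · -- long string: many windows
      rw [if_neg hlt, if_neg heq]
      rw [get_char_ngrams, PySem.List.foldl_append_singleton_eq_map, List.nil_append]
      rw [PySem.List.foldl_append_singleton_eq_map, List.nil_append, List.map_map]
      rw [pvSet_ofList_map_ofList]
      have hne : ∀ w ∈ (PySem.List.pyRange 0 ((orig.toList.length : Int) - (2 + k) + 1) 1).map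
          (fun x => PySem.List.slice orig.toList (some x) (some (x + (2 + k)))), w ≠ [] := by
        intro w hw
        rcases List.mem_map.mp hw with ⟨x, hx, rfl⟩
        rcases PySem.List.mem_pyRange_one.mp hx with ⟨hx0, hx1⟩
        have hxn : x + (2 + k) ≤ (orig.toList.length : Int) := by omega
        rw [pvSliceWindow orig.toList x (2 + k) hx0 (by omega) hxn]
        intro hh
        rcases List.take_eq_nil_iff.mp hh with h' | h'
        · omega
        · rw [List.drop_eq_nil_iff] at h'
          omega
      rw [show (List.map (pvSkipGram ∘ String.ofList)) = List.map (fun t => pvSkipGram (String.ofList t)) from rfl]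
      rw [pvFold_map _ _ _ _ _ _ hne]
      simp only [List.map_nil, List.nil_append]
      rw [List.map_map, List.map_map]
      rw [show ((orig.toList.length : Int)) - (k + 2) + 1 = (orig.toList.length : Int) - (2 + k) + 1 by ring]
      apply congrArg
      apply List.map_congr_left
      intro x hx
      rcases PySem.List.mem_pyRange_one.mp hx with ⟨hx0, hx1⟩
      have hxn : x + (2 + k) ≤ (orig.toList.length : Int) := by omega
      simp only [Function.comp_apply]
      rw [pvSliceWindow orig.toList x (2 + k) hx0 (by omega) hxn]
      have hNk : (((2 + k).toNat : Int)) = 2 + k := Int.toNat_of_nonneg (by omega)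
      have hjN : x.toNat + (2 + k).toNat ≤ orig.toList.length := by omega
      rw [pvG, pvPair, pvWindow_head _ _ _ (by omega) hjN, pvWindow_last _ _ _ (by omega) hjN]
      rw [pvEscDict_getD, pvEscDict_getD]
      rw [PySem.List.pyGetD_eq_getElem _ ' ' (show (0 : Int) ≤ x from hx0) (by omega)]
      rw [PySem.List.pyGetD_eq_getElem _ ' ' (show (0 : Int) ≤ x + (k + 2) - 1 by omega) (by omega)]
      have hidx : (x + (k + 2) - 1).toNat = x.toNat + (2 + k).toNat - 1 := by omega
      simp only [hidx]

theorem get_skip_bigrams_changed : Claim_changed_get_skip_bigrams := by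
  unfold Claim_changed_get_skip_bigrams; decide

theorem get_skip_bigrams_tight : Claim_exact_get_skip_bigrams := by
  intro orig k _ hpre hd
  obtain ⟨hDlen, hDq⟩ := hd
  have hk : 1 ≤ k := hpre
  have hslen : (orig.toList.length : Int) = k + 2 := by
    rw [PySem.Str.len_eq] at hDlen; exact_mod_cast hDlen
  have hsne : orig.toList ≠ [] := by
    intro h0; rw [h0] at hslen; simp at hslen; omega
  rw [pvA_exact orig k hk (by omega) hsne, pvB_exact orig k hk (by omega) hsne]
  intro hEq
  have hx : String.ofList
      (pvEAll ((PySem.Chars.replace (PySem.Chars.replace orig.toList ['<', '$', '>'] ['$'])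
          ['<', '|', '>'] ['|']).headD ' ') ++
        '|' :: pvEAll ((PySem.Chars.replace (PySem.Chars.replace orig.toList ['<', '$', '>'] ['$'])
          ['<', '|', '>'] ['|']).getLastD ' ')) =
      String.ofList (pvEAll (orig.toList.headD ' ') ++ '|' :: pvEAll (orig.toList.getLastD ' ')) := by
    simpa using hEq
  have hlists := congrArg String.toList hx
  simp only [String.toList_ofList] at hlists
  obtain ⟨hu0, hu1⟩ := pvRender_inj _ _ _ _ hlists
  have hrep : PySem.Chars.replace (PySem.Chars.replace orig.toList ['<', '$', '>'] ['$'])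
      ['<', '|', '>'] ['|'] =
      pvRep ['<', '|', '>'] ['|'] (pvRep ['<', '$', '>'] ['$'] orig.toList) := by
    rw [pvRep_replace _ _ _ (by simp), pvRep_replace _ _ _ (by simp)]
  rcases hDq with hq | hq | hq | hq
  · -- starts with '<$>': the unescape turns the head into '$', B keeps '<'
    obtain ⟨r, hr⟩ := (PySem.Chars.startswith_iff _ _).mp
      (by rw [PySem.Str.startswith_eq, show ("<$>" : String).toList = ['<', '$', '>'] from rfl] at hq
          exact hq)
    have hmid : pvRep ['<', '$', '>'] ['$'] orig.toList = '$' :: pvRep ['<', '$', '>'] ['$'] r := by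
      rw [← hr, show (['<', '$', '>'] ++ r : List Char) = '<' :: '$' :: '>' :: r by simp]
      rw [pvRep_cons, if_pos ⟨by rw [List.isPrefixOf_iff_prefix]; exact ⟨r, rfl⟩, by simp⟩]
      simp
    have hh : (pvRep ['<', '|', '>'] ['|'] (pvRep ['<', '$', '>'] ['$'] orig.toList)).head?
        = some '$' := by
      rw [hmid, pvRep_head? _ _ _ (pvNoPrefix_of_head_ne '<' ['|', '>'] _ (by simp))]
      rfl
    rw [hrep, List.headD_eq_head?, hh] at hu0
    rw [show orig.toList.headD ' ' = '<' by rw [← hr]; rfl] at hu0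
    exact absurd hu0 (by decide)
  · -- starts with '<|>': the unescape turns the head into '|', B keeps '<'
    obtain ⟨r, hr⟩ := (PySem.Chars.startswith_iff _ _).mp
      (by rw [PySem.Str.startswith_eq, show ("<|>" : String).toList = ['<', '|', '>'] from rfl] at hq
          exact hq)
    have hmid : pvRep ['<', '$', '>'] ['$'] orig.toList
        = '<' :: '|' :: '>' :: pvRep ['<', '$', '>'] ['$'] r := by
      rw [← hr, show (['<', '|', '>'] ++ r : List Char) = '<' :: '|' :: '>' :: r by simp]
      rw [pvRep_cons, if_neg (by rintro ⟨hx', -⟩; simp [List.isPrefixOf] at hx'),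
        pvRep_cons, if_neg (by rintro ⟨hx', -⟩; simp [List.isPrefixOf] at hx'),
        pvRep_cons, if_neg (by rintro ⟨hx', -⟩; simp [List.isPrefixOf] at hx')]
    have hh : (pvRep ['<', '|', '>'] ['|'] (pvRep ['<', '$', '>'] ['$'] orig.toList)).head?
        = some '|' := by
      rw [hmid, pvRep_cons,
        if_pos ⟨by rw [List.isPrefixOf_iff_prefix]; exact ⟨pvRep ['<', '$', '>'] ['$'] r, rfl⟩,
          by simp⟩]
      rfl
    rw [hrep, List.headD_eq_head?, hh] at hu0
    rw [show orig.toList.headD ' ' = '<' by rw [← hr]; rfl] at hu0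
    exact absurd hu0 (by decide)
  · -- ends with '<$>': the unescape turns the last char into '$', B keeps '>'
    obtain ⟨p, hp⟩ := (PySem.Chars.endswith_iff _ _).mp
      (by rw [PySem.Str.endswith_eq, show ("<$>" : String).toList = ['<', '$', '>'] from rfl] at hq
          exact hq)
    have hmidlast : (pvRep ['<', '$', '>'] ['$'] orig.toList).getLast? = some '$' :=
      pvLast_of_suffix '<' '$' '>' '$' (by decide) (by decide) orig.toList.length orig.toList
        le_rfl ⟨p, hp⟩
    have hnB : ¬ ['<', '|', '>'] <:+ pvRep ['<', '$', '>'] ['$'] orig.toList := by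
      rintro ⟨q, hqq⟩
      rw [← hqq, List.getLast?_append_of_ne_nil _ (by simp)] at hmidlast
      simp at hmidlast
    have hl : (pvRep ['<', '|', '>'] ['|'] (pvRep ['<', '$', '>'] ['$'] orig.toList)).getLast?
        = some '$' := by
      rw [pvRep_getLast? _ _ _ (by simp) (by simp) hnB]
      exact hmidlast
    rw [hrep, List.getLastD_eq_getLast?, hl] at hu1
    rw [show orig.toList.getLastD ' ' = '>' by
      rw [List.getLastD_eq_getLast?, ← hp, List.getLast?_append_of_ne_nil _ (by simp)]; rfl] at hu1
    exact absurd hu1 (by decide)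
  · -- ends with '<|>': the unescape turns the last char into '|', B keeps '>'
    obtain ⟨p, hp⟩ := (PySem.Chars.endswith_iff _ _).mp
      (by rw [PySem.Str.endswith_eq, show ("<|>" : String).toList = ['<', '|', '>'] from rfl] at hq
          exact hq)
    have hmidB : ['<', '|', '>'] <:+ pvRep ['<', '$', '>'] ['$'] orig.toList :=
      pvKeepB_suffix orig.toList.length orig.toList le_rfl ⟨p, hp⟩
    have hl : (pvRep ['<', '|', '>'] ['|'] (pvRep ['<', '$', '>'] ['$'] orig.toList)).getLast?
        = some '|' := by
      obtain ⟨q, hqq⟩ := hmidB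
      exact pvLast_of_suffix '<' '|' '>' '|' (by decide) (by decide)
        (pvRep ['<', '$', '>'] ['$'] orig.toList).length _ le_rfl ⟨q, hqq⟩
    rw [hrep, List.getLastD_eq_getLast?, hl] at hu1
    rw [show orig.toList.getLastD ' ' = '>' by
      rw [List.getLastD_eq_getLast?, ← hp, List.getLast?_append_of_ne_nil _ (by simp)]; rfl] at hu1
    exact absurd hu1 (by decide)
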